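-- pv_equiv track=rewrite | github.com/CarlosLeiva2107/PruebasPython | doesCircleExist.py | doesCircleExist
-- ===== SOURCE A (Python) =====
-- def doesCircleExist(commands):
--     result_array = []
--     for command in commands:
--         possible_result = ''
--         command = command.replace('G', '')
--         if command == 'R' or command == 'L':
--             possible_result = 'YES'
--         else:
--             possible_result = 'NO'
--         for n,c in enumerate(command):
--             if n > 0:
--                 if c == 'R' and command[n-1] == 'R' or c =='L' and command[n-1] == 'L':
--                     possible_result = 'YES'
--                 else:
--                     possible_result = 'NO'
--         result_array.append(possible_result)
--     return result_array
-- ===== SOURCE B (Python) =====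
-- def doesCircleExist(commands):
--     out = []
--     for command in commands:
--         s = command.replace('G', '')
--         if len(s) >= 2:
--             out.append('YES' if s[-1] == s[-2] and s[-1] in ('R', 'L') else 'NO')
--         elif len(s) == 1:
--             out.append('YES' if s in ('R', 'L') else 'NO')
--         else:
--             out.append('NO')
--     return out
-- ===== Notes on version B (the rewrite author's own statement) =====
-- stated objective: simpler
-- what changed: Replaces A's per-character flag-overwriting loop (whose overwrites make only the last step matter) by a constant-work check of the last two non-G characters of each command.
import Mathlib
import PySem

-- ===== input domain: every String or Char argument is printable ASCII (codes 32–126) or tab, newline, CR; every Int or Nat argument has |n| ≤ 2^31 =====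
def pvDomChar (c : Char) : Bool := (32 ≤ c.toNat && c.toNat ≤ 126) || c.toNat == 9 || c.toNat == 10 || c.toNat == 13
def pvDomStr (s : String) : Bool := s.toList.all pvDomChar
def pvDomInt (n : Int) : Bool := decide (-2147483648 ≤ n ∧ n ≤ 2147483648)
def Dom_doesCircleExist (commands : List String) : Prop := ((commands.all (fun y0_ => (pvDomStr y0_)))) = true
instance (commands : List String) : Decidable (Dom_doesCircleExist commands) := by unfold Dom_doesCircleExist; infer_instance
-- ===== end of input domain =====

-- B changes the decomposition: A keeps a running flag rewritten at every character; B checks only the last two non-'G' characters. Same values; the per-command classification becomes constant work after the replace.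

-- ===== PORT A =====
-- one command of A's loop body; string comparisons command == 'R' / 'L' are ported as
-- char-list equalities (exact: String equality is equality of the character lists)
def pvAOne (command : String) : String :=
  let l := (PySem.Str.replace command "G" "").toList
  let possible_result := if l = ['R'] ∨ l = ['L'] then "YES" else "NO"
  (PySem.List.enumerate l).foldl (fun acc nc =>
    if nc.1 > 0 then
      -- command[n-1] is always in range here (n > 0); pyGetD with a dummy default is exact
      if (nc.2 = 'R' ∧ PySem.List.pyGetD l (nc.1 - 1) ' ' = 'R') ∨
         (nc.2 = 'L' ∧ PySem.List.pyGetD l (nc.1 - 1) ' ' = 'L')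
      then "YES" else "NO"
    else acc) possible_result

def doesCircleExist (commands : List String) : List String :=
  commands.foldl (fun result_array command => result_array ++ [pvAOne command]) []

-- ===== PORT B =====
def pvBOne (command : String) : String :=
  let l := (PySem.Str.replace command "G" "").toList
  if 2 ≤ l.length then
    if PySem.List.pyGetD l (-1) ' ' = PySem.List.pyGetD l (-2) ' ' ∧
       (PySem.List.pyGetD l (-1) ' ' = 'R' ∨ PySem.List.pyGetD l (-1) ' ' = 'L')
    then "YES" else "NO"
  else if l.length = 1 then
    if l = ['R'] ∨ l = ['L'] then "YES" else "NO"
  else "NO"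

def doesCircleExist_alt (commands : List String) : List String :=
  commands.map pvBOne

-- ===== PRECONDITION & SPEC =====
def Spec_doesCircleExist (commands : List String) (out : List String) : Prop := out = doesCircleExist_alt commands
instance (commands : List String) (out : List String) : Decidable (Spec_doesCircleExist commands out) := by unfold Spec_doesCircleExist; infer_instance

-- ===== CLAIM (what is proved, stated in full; the proofs are below) =====
def Claim_equal_doesCircleExist : Prop := ∀ (commands : List String), Dom_doesCircleExist commands → Spec_doesCircleExist commands (doesCircleExist commands)

-- ===== LEMMAS AND PROOFS =====

theorem pv_enumerate_append_singleton {α : Type} (xs : List α) (x : α) (s : Int) :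
    PySem.List.enumerate (xs ++ [x]) s = PySem.List.enumerate xs s ++ [(s + xs.length, x)] := by
  induction xs generalizing s with
  | nil => simp [PySem.List.enumerate_cons, PySem.List.enumerate_nil]
  | cons y ys ih =>
      simp [PySem.List.enumerate_cons, ih (s + 1)]
      ring_nf

theorem pvOne_eq (command : String) : pvAOne command = pvBOne command := by
  unfold pvAOne pvBOne
  generalize (PySem.Str.replace command "G" "").toList = l
  rcases h : l.reverse with _ | ⟨a, tl⟩
  · -- l = []
    have : l = [] := by simpa using congrArg List.reverse h
    subst this
    simp [PySem.List.enumerate_nil]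
  · rcases tl with _ | ⟨b, t⟩
    · -- l = [a]
      have : l = [a] := by simpa using congrArg List.reverse h
      subst this
      simp [PySem.List.enumerate_cons, PySem.List.enumerate_nil]
    · -- l = t.reverse ++ [b, a]
      have hl : l = (t.reverse ++ [b]) ++ [a] := by
        have := congrArg List.reverse h
        simpa using this
      subst hl
      dsimp only
      rw [pv_enumerate_append_singleton, List.foldl_append]
      simp only [List.foldl_cons, List.foldl_nil]
      have hpos : (0 : Int) + ((t.reverse ++ [b]).length : Int) > 0 := by simp
      rw [if_pos hpos]
      have hm1 : PySem.List.pyGetD ((t.reverse ++ [b]) ++ [a]) (0 + ((t.reverse ++ [b]).length : Int) - 1) ' ' = b := by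
        have hidx : (0 + ((t.reverse ++ [b]).length : Int) - 1) = ((t.length : Int)) := by simp
        rw [hidx, PySem.List.pyGetD_natCast]
        have : ((t.reverse ++ [b]) ++ [a]).getD t.length ' ' = ((t.reverse ++ [b]) ++ [a])[t.length]'(by simp) := by
          simp [List.getD]
        rw [this, List.getElem_append_left (by simp)]
        simp
      have hneg1 : PySem.List.pyGetD ((t.reverse ++ [b]) ++ [a]) (-1) ' ' = a :=
        PySem.List.pyGetD_neg_one_append_singleton _ _ _
      have hneg2 : PySem.List.pyGetD ((t.reverse ++ [b]) ++ [a]) (-2) ' ' = b := by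
        rw [PySem.List.pyGetD_neg_ofNat _ 2 ' ' (by omega) (by simp)]
        simp
      have hiff : ((a = 'R' ∧ b = 'R') ∨ (a = 'L' ∧ b = 'L')) ↔ (a = b ∧ (a = 'R' ∨ a = 'L')) := by
        constructor
        · rintro (⟨ha, hb⟩ | ⟨ha, hb⟩) <;> subst ha <;> subst hb <;> simp
        · rintro ⟨hab, ha | ha⟩ <;> subst ha
          · exact Or.inl ⟨rfl, hab.symm⟩
          · exact Or.inr ⟨rfl, hab.symm⟩
      rw [hm1, hneg1, hneg2, if_pos (show 2 ≤ ((t.reverse ++ [b]) ++ [a]).length by simp)]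
      by_cases hc : a = b ∧ (a = 'R' ∨ a = 'L')
      · rw [if_pos hc, if_pos (hiff.mpr hc)]
      · rw [if_neg hc, if_neg (fun hh => hc (hiff.mp hh))]

-- ===== VERDICT (by name: the statement is the Claim_ definition above) =====
theorem doesCircleExist_spec : Claim_equal_doesCircleExist := by
  intro commands _
  unfold Spec_doesCircleExist doesCircleExist doesCircleExist_alt
  rw [PySem.List.foldl_append_singleton_eq_map]
  exact List.map_congr_left fun c _ => pvOne_eq c
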